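-- pv_equiv track=rewrite | github.com/jeanbaptistemora/fluidattacks-universe2 | integrates/backend_new/packages/integrates-back/backend/domain/finding/finding.py | compare_historic_treatments
-- ===== SOURCE A (Python) =====
-- from typing import (
--     Any,
--     Callable,
--     cast,
--     Dict,
--     List,
--     Optional,
--     Set,
--     Union
-- )
--
-- def compare_historic_treatments(
--         last_state: Dict[str, str],
--         new_state: Dict[str, str]) -> bool:
--     excluded_attrs = ['date', 'acceptance_date', 'acceptance_status']
--     last_values = [
--         value
--         for key, value in last_state.items()
--         if key not in excluded_attrs
--     ]
--     new_values = [
--         value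
--         for key, value in new_state.items()
--         if key not in excluded_attrs
--     ]
--     date_change = (
--         'acceptance_date' in new_state and
--         'acceptance_date' in last_state and
--         last_state['acceptance_date'].split(' ')[0] !=
--         new_state['acceptance_date'].split(' ')[0]
--     )
--     return sorted(last_values) != sorted(new_values) or date_change
-- ===== SOURCE B (Python) =====
-- def compare_historic_treatments(
--         last_state,
--         new_state) -> bool:
--     excluded_attrs = ('date', 'acceptance_date', 'acceptance_status')
--     remaining = [
--         value
--         for key, value in new_state.items()
--         if key not in excluded_attrs
--     ]
--     treatment_changed = False
--     for key, value in last_state.items():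
--         if key in excluded_attrs:
--             continue
--         if value in remaining:
--             remaining.remove(value)
--         else:
--             treatment_changed = True
--             break
--     else:
--         treatment_changed = bool(remaining)
--     if treatment_changed:
--         return True
--     if 'acceptance_date' in last_state and 'acceptance_date' in new_state:
--         return (last_state['acceptance_date'].split(' ')[0] !=
--                 new_state['acceptance_date'].split(' ')[0])
--     return False
-- ===== Notes on version B (the rewrite author's own statement) =====
-- stated objective: alternative
-- what changed: The sort-based multiset test (sorted(last_values) != sorted(new_values)) is replaced by element cancellation: the non-excluded new values are collected once, then one walk over last_state removes each of its non-excluded values from that pool, breaking early on the first unmatched value; the multisets are equal iff every removal succeeds and the pool ends empty, and the final 'or' becomes an early-return decomposition.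
import Mathlib
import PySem

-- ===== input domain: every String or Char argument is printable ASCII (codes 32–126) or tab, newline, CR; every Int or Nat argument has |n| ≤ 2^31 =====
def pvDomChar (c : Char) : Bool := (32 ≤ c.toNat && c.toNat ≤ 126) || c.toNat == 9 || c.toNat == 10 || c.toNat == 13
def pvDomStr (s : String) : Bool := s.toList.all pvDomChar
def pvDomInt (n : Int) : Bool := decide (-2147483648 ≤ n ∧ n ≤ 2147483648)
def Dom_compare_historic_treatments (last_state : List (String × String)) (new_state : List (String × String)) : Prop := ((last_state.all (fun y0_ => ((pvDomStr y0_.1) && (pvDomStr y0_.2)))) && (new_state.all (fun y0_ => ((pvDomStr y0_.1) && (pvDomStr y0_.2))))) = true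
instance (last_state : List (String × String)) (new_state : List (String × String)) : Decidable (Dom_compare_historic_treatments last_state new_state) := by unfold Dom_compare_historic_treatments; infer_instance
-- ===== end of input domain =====

-- B replaces the sort-based multiset test by element cancellation (remove each last value from a pool
-- of new values, break on the first mismatch) with early returns; same result, different algorithm.
-- The dict arguments are modelled as association lists; each port first normalises them with PySem.Dict.ofList.

-- ===== PORT A =====
def compare_historic_treatments (last_state : List (String × String)) (new_state : List (String × String)) : Bool :=
  let excluded_attrs : List String := ["date", "acceptance_date", "acceptance_status"]
  let ld := PySem.Dict.ofList last_state
  let nd := PySem.Dict.ofList new_state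
  let last_values := (ld.items.filter (fun kv => !(excluded_attrs.contains kv.1))).map (·.2)
  let new_values := (nd.items.filter (fun kv => !(excluded_attrs.contains kv.1))).map (·.2)
  let date_change :=
    nd.contains "acceptance_date" && ld.contains "acceptance_date" &&
    -- s.split(' ') with a non-empty separator always yields a non-empty list, so [0] is headD
    ((((PySem.Str.split? (ld.getD "acceptance_date" "") " ").getD [])).headD "" !=
     (((PySem.Str.split? (nd.getD "acceptance_date" "") " ").getD [])).headD "")
  (PySem.List.sorted last_values (fun x => x) false != PySem.List.sorted new_values (fun x => x) false) || date_change

-- ===== PORT B =====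
-- Source B's for/else loop over last_state.items(): skip excluded keys, remove each value from the
-- remaining pool (`remaining.remove(value)` on a member = erase of the first occurrence),
-- return True at the first unmatched value; on normal exit, changed iff the pool is non-empty.
def pvCancelLoop (excluded : List String) : List (String × String) → List String → Bool
  | [], remaining => !remaining.isEmpty
  | (k, v) :: rest, remaining =>
    if excluded.contains k then pvCancelLoop excluded rest remaining
    else if remaining.contains v then
      pvCancelLoop excluded rest ((PySem.List.remove? remaining v).getD remaining)
    else true

def compare_historic_treatments_alt (last_state : List (String × String)) (new_state : List (String × String)) : Bool :=
  let excluded_attrs : List String := ["date", "acceptance_date", "acceptance_status"]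
  let ld := PySem.Dict.ofList last_state
  let nd := PySem.Dict.ofList new_state
  let remaining := (nd.items.filter (fun kv => !(excluded_attrs.contains kv.1))).map (·.2)
  let treatment_changed := pvCancelLoop excluded_attrs ld.items remaining
  if treatment_changed then true
  else if ld.contains "acceptance_date" && nd.contains "acceptance_date" then
    ((((PySem.Str.split? (ld.getD "acceptance_date" "") " ").getD [])).headD "" !=
     (((PySem.Str.split? (nd.getD "acceptance_date" "") " ").getD [])).headD "")
  else false

-- ===== PRECONDITION & SPEC =====
def Spec_compare_historic_treatments (last_state : List (String × String)) (new_state : List (String × String)) (out : Bool) : Prop := out = compare_historic_treatments_alt last_state new_state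
instance (last_state : List (String × String)) (new_state : List (String × String)) (out : Bool) : Decidable (Spec_compare_historic_treatments last_state new_state out) := by unfold Spec_compare_historic_treatments; infer_instance

-- ===== CLAIM (what is proved, stated in full; the proofs are below) =====
def Claim_equal_compare_historic_treatments : Prop := ∀ (last_state : List (String × String)) (new_state : List (String × String)), Dom_compare_historic_treatments last_state new_state → Spec_compare_historic_treatments last_state new_state (compare_historic_treatments last_state new_state)

-- ===== LEMMAS AND PROOFS =====

-- The cancellation loop returns false exactly when the non-excluded values of `items`
-- form the same multiset as the pool.
theorem pvCancelLoop_eq_false_iff (excluded : List String) (items : List (String × String))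
    (remaining : List String) :
    pvCancelLoop excluded items remaining = false ↔
      ((items.filter (fun kv => !(excluded.contains kv.1))).map (·.2)).Perm remaining := by
  induction items generalizing remaining with
  | nil =>
    cases remaining with
    | nil => simp [pvCancelLoop]
    | cons a l => simp [pvCancelLoop]
  | cons kv rest ih =>
    obtain ⟨k, v⟩ := kv
    by_cases hk : excluded.contains k = true
    · have hkm : k ∈ excluded := by simpa using hk
      have e1 : pvCancelLoop excluded ((k, v) :: rest) remaining
          = pvCancelLoop excluded rest remaining := by simp [pvCancelLoop, hkm]
      have e2 : ((k, v) :: rest).filter (fun kv => !(excluded.contains kv.1))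
          = rest.filter (fun kv => !(excluded.contains kv.1)) := by
        simp [hkm]
      rw [e1, e2]; exact ih remaining
    · have hk' : k ∉ excluded := by simpa using hk
      have e2 : (((k, v) :: rest).filter (fun kv => !(excluded.contains kv.1))).map (·.2)
          = v :: (rest.filter (fun kv => !(excluded.contains kv.1))).map (·.2) := by
        simp [hk']
      by_cases hv : remaining.contains v = true
      · have hmem : v ∈ remaining := by simpa using hv
        have e1 : pvCancelLoop excluded ((k, v) :: rest) remaining
            = pvCancelLoop excluded rest (remaining.erase v) := by
          simp [pvCancelLoop, hk', hmem, PySem.List.remove?_eq_some_erase _ _ hmem]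
        rw [e1, e2, ih, List.cons_perm_iff_perm_erase]
        simp [hmem]
      · have hmem : v ∉ remaining := by simpa using hv
        have e1 : pvCancelLoop excluded ((k, v) :: rest) remaining = true := by
          simp [pvCancelLoop, hk', hmem]
        rw [e1, e2]
        simp only [Bool.true_eq_false, false_iff]
        intro h
        exact hmem (h.mem_iff.mp (List.mem_cons_self ..))

theorem pvCancelLoop_eq_sorted_bne (excluded : List String) (items : List (String × String))
    (remaining : List String) :
    pvCancelLoop excluded items remaining =
      (PySem.List.sorted ((items.filter (fun kv => !(excluded.contains kv.1))).map (·.2)) (fun x => x) false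
        != PySem.List.sorted remaining (fun x => x) false) := by
  by_cases h : pvCancelLoop excluded items remaining = false
  · have hp := (pvCancelLoop_eq_false_iff excluded items remaining).mp h
    rw [h, Eq.comm, bne_eq_false_iff_eq.mpr]
    exact (PySem.List.sorted_id_eq_sorted_id_iff_perm _ _).mpr hp
  · rw [Bool.not_eq_false] at h
    rw [h, Eq.comm, bne_iff_ne]
    intro hs
    have hp := (PySem.List.sorted_id_eq_sorted_id_iff_perm _ _).mp hs
    have := (pvCancelLoop_eq_false_iff excluded items remaining).mpr hp
    rw [h] at this
    simp at this

-- ===== VERDICT (by name: the statement is the Claim_ definition above) =====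
theorem compare_historic_treatments_spec : Claim_equal_compare_historic_treatments := by
  intro last_state new_state _
  unfold Spec_compare_historic_treatments compare_historic_treatments compare_historic_treatments_alt
  simp only [pvCancelLoop_eq_sorted_bne]
  cases h1 : (PySem.Dict.ofList last_state).contains "acceptance_date" <;>
  cases h2 : (PySem.Dict.ofList new_state).contains "acceptance_date" <;>
  cases hs : (PySem.List.sorted (((PySem.Dict.ofList last_state).items.filter
      (fun kv => !(["date", "acceptance_date", "acceptance_status"].contains kv.1))).map (·.2)) (fun x => x) false
    != PySem.List.sorted (((PySem.Dict.ofList new_state).items.filter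
      (fun kv => !(["date", "acceptance_date", "acceptance_status"].contains kv.1))).map (·.2)) (fun x => x) false) <;>
  simp
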